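-- pv_equiv track=rewrite | github.com/Prerana2309/ecolab-python | calendarr.py | date_value
-- ===== SOURCE A (Python) =====
-- def is_leap_year(year):
--     return (year%100!=0 and year%4==0) or year%400==0
--
-- def days_in_month(month , year=1990):
--     if month==2:
--         return 28+int(is_leap_year(year))
--     elif (month<8 and month%2!=0) or (month>=8 and month%2==0):
--         return 31
--     else:
--         return 30
--
-- def date_value(day ,month, year):
--     value=0
--     y=year-1
--     value = y * 365 + y//4  - y//100 + y//400
--
--     m=1
--     while m<month:
--         value+= days_in_month(m,year)
--         m+=1
--
--     value+=day
--     return value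
-- ===== SOURCE B (Python) =====
-- def is_leap_year(year):
--     return (year%100!=0 and year%4==0) or year%400==0
--
-- def date_value(day, month, year):
--     # closed form: no month loop
--     y = year - 1
--     value = y*365 + y//4 - y//100 + y//400
--     n = month - 1 if month > 1 else 0   # number of whole months elapsed
--     thirty_ones = (n + 1)//2 if n <= 7 else n//2 + 1
--     feb_adj = (int(is_leap_year(year)) - 2) if n >= 2 else 0
--     return value + 30*n + thirty_ones + feb_adj + day
-- ===== Notes on version B (the rewrite author's own statement) =====
-- stated objective: simpler
-- what changed: Replaced the month-by-month while-loop that repeatedly calls days_in_month with a closed-form expression: 30 per elapsed month plus a floor-division count of the 31-day months plus a February correction.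
import Mathlib
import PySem

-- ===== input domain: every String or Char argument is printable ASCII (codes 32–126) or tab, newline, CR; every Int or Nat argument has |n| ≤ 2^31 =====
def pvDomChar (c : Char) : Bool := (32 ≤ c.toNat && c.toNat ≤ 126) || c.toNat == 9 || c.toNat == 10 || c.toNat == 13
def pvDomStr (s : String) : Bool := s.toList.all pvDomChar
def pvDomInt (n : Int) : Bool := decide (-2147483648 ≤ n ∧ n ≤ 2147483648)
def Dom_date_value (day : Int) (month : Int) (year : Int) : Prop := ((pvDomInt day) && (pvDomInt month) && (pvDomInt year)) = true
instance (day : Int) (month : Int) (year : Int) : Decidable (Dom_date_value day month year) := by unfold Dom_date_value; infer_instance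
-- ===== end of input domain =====

-- B replaces A's month-by-month accumulation loop with a closed-form month term (simpler, loop-free).

-- ===== PORT A =====
def is_leap_year (year : Int) : Bool :=
  (PySem.Int.mod year 100 != 0 && PySem.Int.mod year 4 == 0) || PySem.Int.mod year 400 == 0

def days_in_month (month : Int) (year : Int) : Int :=
  if month = 2 then 28 + (if is_leap_year year then 1 else 0)
  else if (month < 8 ∧ PySem.Int.mod month 2 ≠ 0) ∨ (8 ≤ month ∧ PySem.Int.mod month 2 = 0) then 31
  else 30

-- the 'while m < month' loop of A
def dvLoop (month : Int) (year : Int) (m : Int) (value : Int) : Int :=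
  if m < month then dvLoop month year (m + 1) (value + days_in_month m year) else value
termination_by (month - m).toNat
decreasing_by omega

def date_value (day : Int) (month : Int) (year : Int) : Int :=
  let y := year - 1
  let value := y * 365 + PySem.Int.floordiv y 4 - PySem.Int.floordiv y 100 + PySem.Int.floordiv y 400
  dvLoop month year 1 value + day

-- ===== PORT B =====
def is_leap_year_alt (year : Int) : Bool :=
  (PySem.Int.mod year 100 != 0 && PySem.Int.mod year 4 == 0) || PySem.Int.mod year 400 == 0

def date_value_alt (day : Int) (month : Int) (year : Int) : Int :=
  let y := year - 1
  let value := y * 365 + PySem.Int.floordiv y 4 - PySem.Int.floordiv y 100 + PySem.Int.floordiv y 400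
  let n := if month > 1 then month - 1 else 0
  let thirty_ones := if n ≤ 7 then PySem.Int.floordiv (n + 1) 2 else PySem.Int.floordiv n 2 + 1
  let feb_adj := if n ≥ 2 then (if is_leap_year_alt year then 1 else 0) - 2 else 0
  value + 30 * n + thirty_ones + feb_adj + day

-- ===== PRECONDITION & SPEC =====
def Spec_date_value (day : Int) (month : Int) (year : Int) (out : Int) : Prop := out = date_value_alt day month year
instance (day : Int) (month : Int) (year : Int) (out : Int) : Decidable (Spec_date_value day month year out) := by unfold Spec_date_value; infer_instance

-- ===== CLAIM (what is proved, stated in full; the proofs are below) =====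
def Claim_equal_date_value : Prop := ∀ (day : Int) (month : Int) (year : Int), Dom_date_value day month year → Spec_date_value day month year (date_value day month year)

-- ===== LEMMAS AND PROOFS =====

-- closed-form partial sum: S L n = days in the first n months (L = leap indicator)
def dvS (L : Int) (n : Int) : Int :=
  30 * n + (if n ≤ 7 then PySem.Int.floordiv (n + 1) 2 else PySem.Int.floordiv n 2 + 1)
    + (if n ≥ 2 then L - 2 else 0)

theorem dvS_step (year : Int) (m : Int) (hm : 1 ≤ m) :
    dvS (if is_leap_year year then 1 else 0) m
      = dvS (if is_leap_year year then 1 else 0) (m - 1) + days_in_month m year := by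
  unfold dvS days_in_month
  generalize (if is_leap_year year then (1:Int) else 0) = L
  rw [PySem.Int.mod_eq_emod_of_pos (a := m) (by norm_num),
      PySem.Int.floordiv_eq_ediv_of_pos (a := m + 1) (by norm_num),
      PySem.Int.floordiv_eq_ediv_of_pos (a := m) (by norm_num),
      PySem.Int.floordiv_eq_ediv_of_pos (a := m - 1 + 1) (by norm_num),
      PySem.Int.floordiv_eq_ediv_of_pos (a := m - 1) (by norm_num)]
  split_ifs <;> omega

theorem dvLoop_eq (year : Int) (fuel : Nat) :
    ∀ (month m v : Int), (month - m).toNat = fuel → 1 ≤ m →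
      dvLoop month year m v
        = v + dvS (if is_leap_year year then 1 else 0) (max (month - 1) (m - 1))
            - dvS (if is_leap_year year then 1 else 0) (m - 1) := by
  induction fuel with
  | zero =>
    intro month m v hf hm
    rw [dvLoop, if_neg (by omega)]
    have : max (month - 1) (m - 1) = m - 1 := by omega
    rw [this]; ring
  | succ k ih =>
    intro month m v hf hm
    have hlt : m < month := by omega
    rw [dvLoop, if_pos hlt]
    rw [ih month (m + 1) (v + days_in_month m year) (by omega) (by omega)]
    have h1 : max (month - 1) (m + 1 - 1) = month - 1 := by omega
    have h2 : max (month - 1) (m - 1) = month - 1 := by omega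
    have h3 : m + 1 - 1 = m := by ring
    rw [h1, h2, h3]
    have hstep := dvS_step year m hm
    omega

theorem dvS_zero (L : Int) : dvS L 0 = 0 := by
  have h : PySem.Int.floordiv (0 + 1) 2 = 0 := by decide
  unfold dvS; rw [if_pos (by norm_num : (0:Int) ≤ 7), h, if_neg (by norm_num : ¬ ((0:Int) ≥ 2))]; ring

-- ===== VERDICT (by name: the statement is the Claim_ definition above) =====
theorem date_value_spec : Claim_equal_date_value := by
  intro day month year _
  unfold Spec_date_value
  show dvLoop month year 1 ((year - 1) * 365 + PySem.Int.floordiv (year - 1) 4 - PySem.Int.floordiv (year - 1) 100 + PySem.Int.floordiv (year - 1) 400) + day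
      = (year - 1) * 365 + PySem.Int.floordiv (year - 1) 4 - PySem.Int.floordiv (year - 1) 100 + PySem.Int.floordiv (year - 1) 400
        + 30 * (if month > 1 then month - 1 else 0)
        + (if (if month > 1 then month - 1 else 0) ≤ 7 then PySem.Int.floordiv ((if month > 1 then month - 1 else 0) + 1) 2
           else PySem.Int.floordiv (if month > 1 then month - 1 else 0) 2 + 1)
        + (if (if month > 1 then month - 1 else 0) ≥ 2 then (if is_leap_year_alt year then 1 else 0) - 2 else 0)
        + day
  rw [dvLoop_eq year (month - 1).toNat month 1 _ rfl (by norm_num)]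
  have e0 : (1:Int) - 1 = 0 := by norm_num
  rw [e0, dvS_zero]
  have hn : (if month > 1 then month - 1 else 0) = max (month - 1) 0 := by
    split_ifs <;> omega
  rw [← hn]
  have hL : is_leap_year_alt year = is_leap_year year := rfl
  rw [hL]
  unfold dvS
  ring
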